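-- pv_equiv track=rewrite | github.com/kumarvikasarc-design/store_dashboard | Backup 270126/warehouse_dashboard.py | find_item_column
-- ===== SOURCE A (Python) =====
-- def find_item_column(cols):
--     # 1️⃣ Exact "item name" first
--     for c in cols:
--         if c.strip() == "item name":
--             return c
--     # 2️⃣ Contains "item name"
--     for c in cols:
--         if "item name" in c:
--             return c
--     # 3️⃣ LAST fallback: generic item
--     for c in cols:
--         if "item" in c:
--             return c
--     return None
-- ===== SOURCE B (Python) =====
-- def find_item_column(cols):
--     first_itemname = None
--     first_item = None
--     for c in cols:
--         if c.strip() == "item name":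
--             return c
--         if first_itemname is None and "item name" in c:
--             first_itemname = c
--         if first_item is None and "item" in c:
--             first_item = c
--     return first_itemname if first_itemname is not None else first_item
-- ===== Notes on version B (the rewrite author's own statement) =====
-- stated objective: alternative
-- what changed: Replaced A's three sequential scans with a single pass that returns immediately on an exact 'item name' match while remembering the first 'item name'-containing and first 'item'-containing columns as fallbacks.
import Mathlib
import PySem

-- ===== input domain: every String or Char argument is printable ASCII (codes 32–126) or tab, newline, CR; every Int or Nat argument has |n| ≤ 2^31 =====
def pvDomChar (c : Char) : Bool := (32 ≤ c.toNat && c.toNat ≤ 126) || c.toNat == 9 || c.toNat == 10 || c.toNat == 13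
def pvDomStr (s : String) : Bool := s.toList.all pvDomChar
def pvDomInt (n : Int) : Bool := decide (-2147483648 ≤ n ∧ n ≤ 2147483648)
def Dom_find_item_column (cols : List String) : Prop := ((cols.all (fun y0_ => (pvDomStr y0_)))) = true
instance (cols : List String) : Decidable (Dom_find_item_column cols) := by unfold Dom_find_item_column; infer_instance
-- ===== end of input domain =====

-- ===== PORT A =====
-- B collapses A's three scans into one pass with two remembered fallback candidates.
-- pass 1: first column whose strip equals "item name"
def pvLoop1 (cols : List String) : Option String :=
  match cols with
  | [] => none
  | c :: rest => if PySem.Str.strip c == "item name" then some c else pvLoop1 rest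

-- pass 2: first column containing "item name"
def pvLoop2 (cols : List String) : Option String :=
  match cols with
  | [] => none
  | c :: rest => if PySem.Str.isIn "item name" c then some c else pvLoop2 rest

-- pass 3: first column containing "item"
def pvLoop3 (cols : List String) : Option String :=
  match cols with
  | [] => none
  | c :: rest => if PySem.Str.isIn "item" c then some c else pvLoop3 rest

def find_item_column (cols : List String) : Option String :=
  match pvLoop1 cols with
  | some c => some c
  | none =>
    match pvLoop2 cols with
    | some c => some c
    | none => pvLoop3 cols

-- ===== PORT B =====
-- single loop of Source B, carrying first_itemname / first_item
def pvAltLoop (cols : List String) (firstItemname firstItem : Option String) : Option String :=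
  match cols with
  | [] => match firstItemname with | some x => some x | none => firstItem
  | c :: rest =>
    if PySem.Str.strip c == "item name" then some c
    else
      let firstItemname' :=
        if firstItemname.isNone && PySem.Str.isIn "item name" c then some c else firstItemname
      let firstItem' :=
        if firstItem.isNone && PySem.Str.isIn "item" c then some c else firstItem
      pvAltLoop rest firstItemname' firstItem'

def find_item_column_alt (cols : List String) : Option String :=
  pvAltLoop cols none none

-- ===== PRECONDITION & SPEC =====
def Spec_find_item_column (cols : List String) (out : Option String) : Prop := out = find_item_column_alt cols
instance (cols : List String) (out : Option String) : Decidable (Spec_find_item_column cols out) := by unfold Spec_find_item_column; infer_instance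

-- ===== CLAIM (what is proved, stated in full; the proofs are below) =====
def Claim_equal_find_item_column : Prop := ∀ (cols : List String), Dom_find_item_column cols → Spec_find_item_column cols (find_item_column cols)

-- ===== LEMMAS AND PROOFS =====

lemma pvAltLoop_eq (cols : List String) (fin fi : Option String) :
    pvAltLoop cols fin fi =
      (pvLoop1 cols).or (fin.or ((pvLoop2 cols).or (fi.or (pvLoop3 cols)))) := by
  induction cols generalizing fin fi with
  | nil => cases fin <;> cases fi <;> simp [pvAltLoop, pvLoop1, pvLoop2, pvLoop3]
  | cons c rest ih =>
    simp only [pvAltLoop, pvLoop1, pvLoop2, pvLoop3]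
    by_cases h1 : (PySem.Str.strip c == "item name") = true
    · simp [h1]
    · simp only [h1, if_false, Bool.false_eq_true, ih]
      cases fin <;> cases fi <;>
        by_cases h2 : PySem.Str.isIn "item name" c = true <;>
        by_cases h3 : PySem.Str.isIn "item" c = true <;>
        simp_all [Option.or]

-- ===== VERDICT (by name: the statement is the Claim_ definition above) =====
theorem find_item_column_spec : Claim_equal_find_item_column := by
  intro cols _
  unfold Spec_find_item_column find_item_column find_item_column_alt
  rw [pvAltLoop_eq]
  cases pvLoop1 cols <;> cases pvLoop2 cols <;> simp [Option.or]
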